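-- pv_equiv track=rewrite | github.com/nverbic/python-days-of-code | src/55 Day/reverse_words.py | reverse_words_in_text
-- ===== SOURCE A (Python) =====
-- def reverse_words_in_text(string_to_reverse):
--     ''' Reverse the words in a string but keep the non-alphanumeric chars
--       on their positions '''
--
--     reversed_word = ""
--     reversed_words = []
--     alphanumeric = ""
--
--     # Split string into list of words
--     words = string_to_reverse.split()
--
--     for word in words:
--         for char in word:
--             if char.isalnum():
--                 alphanumeric += char
--             else:
--                 # If character is not alphanum., revert the characters that are found so far
--                 # and after that add also the non-alphanum. character.
--                 reversed_word += alphanumeric[::-1]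
--                 alphanumeric = ""
--                 reversed_word += char
--
--         # Append the last alphanumeric characters (if any)
--         reversed_word += alphanumeric[::-1]
--
--         # Append the reversed word to the list of words
--         reversed_words.append(reversed_word)
--
--         # Reset variables
--         reversed_word = ""
--         alphanumeric = ""
--
--     # Join the reversed words into string
--     reversed_string = ' '.join(reversed_words)
--     return reversed_string
-- ===== SOURCE B (Python) =====
-- def _runs(word):
--     ''' Partition word into maximal runs of same-isalnum() characters,
--         as a list of (is_alnum, list_of_chars) pairs. '''
--     runs = []
--     for c in word:
--         k = c.isalnum()
--         if runs and runs[-1][0] == k: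
--             runs[-1][1].append(c)
--         else:
--             runs.append((k, [c]))
--     return runs
--
--
-- def reverse_words_in_text(string_to_reverse):
--     return ' '.join(
--         ''.join(''.join(g[::-1] if k else g) for k, g in _runs(word))
--         for word in string_to_reverse.split())
-- ===== Notes on version B (the rewrite author's own statement) =====
-- stated objective: simpler
-- what changed: Replaced A's per-character accumulate-and-flush state machine (two mutable string accumulators) with a run-partition-then-map decomposition: each word is split into maximal isalnum runs and each alphanumeric run is reversed.
import Mathlib
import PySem

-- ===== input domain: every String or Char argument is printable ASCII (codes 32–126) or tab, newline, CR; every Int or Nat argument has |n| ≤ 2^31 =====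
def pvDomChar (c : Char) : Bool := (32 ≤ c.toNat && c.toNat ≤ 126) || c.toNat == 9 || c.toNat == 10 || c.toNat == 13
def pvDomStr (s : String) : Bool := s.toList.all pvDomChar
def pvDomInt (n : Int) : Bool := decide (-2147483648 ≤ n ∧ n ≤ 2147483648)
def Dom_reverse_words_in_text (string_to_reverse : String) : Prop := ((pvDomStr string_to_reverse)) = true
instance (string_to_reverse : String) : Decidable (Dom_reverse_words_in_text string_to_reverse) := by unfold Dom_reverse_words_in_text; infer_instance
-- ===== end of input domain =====

-- B replaces A's per-character accumulate-and-flush state machine by a run-partition-then-map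
-- decomposition (simpler); same O(n) cost, return values proved equal on the whole domain.

-- ===== PORT A =====
-- one step of A's inner 'for char in word' loop; state = (reversed_word, alphanumeric)
def pvAStep (st : List Char × List Char) (c : Char) : List Char × List Char :=
  if PySem.Chars.isalnum c then (st.1, st.2 ++ [c])
  else (st.1 ++ st.2.reverse ++ [c], [])

-- A's per-word body: run the loop, then append the final alphanumeric[::-1]
def pvAWord (w : List Char) : List Char :=
  let st := w.foldl pvAStep ([], [])
  st.1 ++ st.2.reverse

def reverse_words_in_text (string_to_reverse : String) : String :=
  let words := PySem.Str.split₀ string_to_reverse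
  let reversed_words := words.foldl (fun acc word => acc ++ [String.ofList (pvAWord word.toList)]) []
  PySem.Str.join " " reversed_words

-- ===== PORT B =====
-- Source B's _runs loop body: start a new run or extend the last one
def pvRunStep (runs : List (Bool × List Char)) (c : Char) : List (Bool × List Char) :=
  let k := PySem.Chars.isalnum c
  match runs.getLast? with
  | some (k', g) => if k' == k then runs.dropLast ++ [(k', g ++ [c])] else runs ++ [(k, [c])]
  | none => runs ++ [(k, [c])]

-- Source B's _runs: maximal runs of same-isalnum characters, built left to right
def pvRuns (w : List Char) : List (Bool × List Char) := w.foldl pvRunStep []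

-- Source B's per-word generator: reverse the alphanumeric runs, concatenate
def pvAltWord (w : List Char) : List Char :=
  (pvRuns w).flatMap (fun kg => if kg.1 then kg.2.reverse else kg.2)

def reverse_words_in_text_alt (string_to_reverse : String) : String :=
  PySem.Str.join " "
    ((PySem.Str.split₀ string_to_reverse).map (fun word => String.ofList (pvAltWord word.toList)))

-- ===== PRECONDITION & SPEC =====
def Spec_reverse_words_in_text (string_to_reverse : String) (out : String) : Prop := out = reverse_words_in_text_alt string_to_reverse
instance (string_to_reverse : String) (out : String) : Decidable (Spec_reverse_words_in_text string_to_reverse out) := by unfold Spec_reverse_words_in_text; infer_instance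

-- ===== CLAIM (what is proved, stated in full; the proofs are below) =====
def Claim_equal_reverse_words_in_text : Prop := ∀ (string_to_reverse : String), Dom_reverse_words_in_text string_to_reverse → Spec_reverse_words_in_text string_to_reverse (reverse_words_in_text string_to_reverse)

-- ===== LEMMAS AND PROOFS =====

-- proof-side recursive characterisation of B's run partition
def pvRunsR : List Char → List (Bool × List Char)
  | [] => []
  | c :: cs =>
    let k := PySem.Chars.isalnum c
    match pvRunsR cs with
    | (k', g) :: rest => if k' == k then (k, c :: g) :: rest else (k, [c]) :: (k', g) :: rest
    | [] => [(k, [c])]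

def pvAltWordR (w : List Char) : List Char :=
  (pvRunsR w).flatMap (fun kg => if kg.1 then kg.2.reverse else kg.2)

-- one-step unfolding lemmas
theorem pvRunsR_cons (c : Char) (cs : List Char) :
    pvRunsR (c :: cs) =
      match pvRunsR cs with
      | (k', g) :: rest =>
        if k' == PySem.Chars.isalnum c then (PySem.Chars.isalnum c, c :: g) :: rest
        else (PySem.Chars.isalnum c, [c]) :: (k', g) :: rest
      | [] => [(PySem.Chars.isalnum c, [c])] := rfl

-- A's word loop with pending alphanumerics al and remaining characters cs, abstracted
def pvH (al : List Char) : List Char → List Char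
  | [] => al.reverse
  | c :: cs => if PySem.Chars.isalnum c then pvH (al ++ [c]) cs else al.reverse ++ c :: pvH [] cs

theorem pvH_nil (al : List Char) : pvH al [] = al.reverse := rfl
theorem pvH_cons (al : List Char) (c : Char) (cs : List Char) :
    pvH al (c :: cs) =
      if PySem.Chars.isalnum c then pvH (al ++ [c]) cs else al.reverse ++ c :: pvH [] cs := rfl

theorem pvA_fold (cs : List Char) : ∀ rw al,
    (let st := cs.foldl pvAStep (rw, al); st.1 ++ st.2.reverse) = rw ++ pvH al cs := by
  induction cs with
  | nil => simp [pvH_nil]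
  | cons c cs ih =>
    intro rw al
    by_cases h : PySem.Chars.isalnum c = true
    · simpa [pvAStep, pvH_cons, h] using ih rw (al ++ [c])
    · simp [pvAStep, pvH_cons, h, ih]

theorem pvRunsRR_head (c : Char) (cs : List Char) :
    ∃ g rest, pvRunsR (c :: cs) = (PySem.Chars.isalnum c, c :: g) :: rest := by
  rw [pvRunsR_cons]
  rcases h : pvRunsR cs with _ | ⟨⟨k', g⟩, rest⟩
  · exact ⟨[], [], rfl⟩
  · by_cases hk : k' == PySem.Chars.isalnum c
    · exact ⟨g, rest, by simp [hk]⟩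
    · exact ⟨[], (k', g) :: rest, by simp [hk]⟩

theorem pvRunsRR_allalnum (al : List Char) (hne : al ≠ [])
    (hal : ∀ x ∈ al, PySem.Chars.isalnum x = true) : pvRunsR al = [(true, al)] := by
  induction al with
  | nil => exact absurd rfl hne
  | cons a al ih =>
    have ha : PySem.Chars.isalnum a = true := hal a (by simp)
    cases al with
    | nil => simp [pvRunsR, ha]
    | cons b bl =>
      have h2 := ih (by simp) (fun x hx => hal x (List.mem_cons_of_mem _ hx))
      rw [pvRunsR_cons, h2]
      simp [ha]

theorem pvRunsRR_split (c : Char) (cs : List Char) (hc : PySem.Chars.isalnum c = false) :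
    ∀ al, al ≠ [] → (∀ x ∈ al, PySem.Chars.isalnum x = true) →
    pvRunsR (al ++ c :: cs) = (true, al) :: pvRunsR (c :: cs) := by
  intro al
  induction al with
  | nil => intro h; exact absurd rfl h
  | cons a al ih =>
    intro _ hal
    have ha : PySem.Chars.isalnum a = true := hal a (by simp)
    cases al with
    | nil =>
      obtain ⟨g, rest, hg⟩ := pvRunsRR_head c cs
      rw [hc] at hg
      rw [List.singleton_append, pvRunsR_cons a (c :: cs), hg]
      simp [ha]
    | cons b bl =>
      have h2 := ih (by simp) (fun x hx => hal x (List.mem_cons_of_mem _ hx))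
      rw [List.cons_append, pvRunsR_cons a, h2]
      simp [ha]

theorem pvAltWordR_cons_notalnum (c : Char) (cs : List Char)
    (hc : PySem.Chars.isalnum c = false) : pvAltWordR (c :: cs) = c :: pvAltWordR cs := by
  unfold pvAltWordR
  rw [pvRunsR_cons, hc]
  rcases h : pvRunsR cs with _ | ⟨⟨k', g⟩, rest⟩
  · simp
  · cases k' with
    | false => simp
    | true => simp

theorem pvH_eq (cs : List Char) : ∀ al, (∀ x ∈ al, PySem.Chars.isalnum x = true) →
    pvH al cs = pvAltWordR (al ++ cs) := by
  induction cs with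
  | nil =>
    intro al hal
    cases h : al with
    | nil => simp [pvH_nil, pvAltWordR, pvRunsR]
    | cons a al' =>
      rw [← h, pvH_nil]
      have := pvRunsRR_allalnum al (by simp [h]) hal
      simp [pvAltWordR, this]
  | cons c cs ih =>
    intro al hal
    rw [pvH_cons]
    by_cases hc : PySem.Chars.isalnum c = true
    · rw [if_pos hc, ih (al ++ [c]) ?_, List.append_assoc, List.singleton_append]
      intro x hx
      rcases List.mem_append.mp hx with h | h
      · exact hal x h
      · simp at h; subst h; exact hc
    · have hc' : PySem.Chars.isalnum c = false := by simpa using hc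
      have hrec : pvH [] cs = pvAltWordR cs := by simpa using ih [] (by simp)
      rw [if_neg hc, hrec]
      cases h : al with
      | nil => simp [pvAltWordR_cons_notalnum c cs hc']
      | cons a al' =>
        rw [← h]
        calc al.reverse ++ c :: pvAltWordR cs
            = al.reverse ++ pvAltWordR (c :: cs) := by
              rw [pvAltWordR_cons_notalnum c cs hc']
          _ = pvAltWordR (al ++ c :: cs) := by
              unfold pvAltWordR
              rw [pvRunsRR_split c cs hc' al (by simp [h]) hal, List.flatMap_cons]
              rfl

-- gluing a run list built so far onto a run list of the remaining suffix
def pvMerge (rs ts : List (Bool × List Char)) : List (Bool × List Char) :=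
  match ts with
  | [] => rs
  | (k, g) :: rest =>
    match rs.getLast? with
    | some (k', g') => if k' == k then rs.dropLast ++ (k', g' ++ g) :: rest else rs ++ (k, g) :: rest
    | none => (k, g) :: rest

theorem pvMerge_nil_left (ts : List (Bool × List Char)) : pvMerge [] ts = ts := by
  cases ts with
  | nil => rfl
  | cons t ts => rfl

theorem pvFoldl_merge (cs : List Char) : ∀ rs,
    cs.foldl pvRunStep rs = pvMerge rs (pvRunsR cs) := by
  induction cs with
  | nil => intro rs; rfl
  | cons c cs ih =>
    intro rs
    rw [List.foldl_cons, ih (pvRunStep rs c), pvRunsR_cons]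
    rcases hr : pvRunsR cs with _ | ⟨⟨k1, g⟩, rest⟩
    · rcases hl : rs.getLast? with _ | ⟨k2, g'⟩
      · have hrs : rs = [] := List.getLast?_eq_none_iff.mp hl
        subst hrs
        simp [pvRunStep, pvMerge]
      · by_cases hk : k2 = PySem.Chars.isalnum c
        · simp [pvRunStep, pvMerge, hl, hk]
        · simp [pvRunStep, pvMerge, hl, hk]
    · by_cases h1 : k1 = PySem.Chars.isalnum c
      · rcases hl : rs.getLast? with _ | ⟨k2, g'⟩
        · have hrs : rs = [] := List.getLast?_eq_none_iff.mp hl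
          subst hrs
          simp [pvRunStep, pvMerge, h1]
        · by_cases hk : k2 = PySem.Chars.isalnum c
          · simp [pvRunStep, pvMerge, hl, hk, h1]
          · simp [pvRunStep, pvMerge, hl, hk, h1]
      · rcases hl : rs.getLast? with _ | ⟨k2, g'⟩
        · have hrs : rs = [] := List.getLast?_eq_none_iff.mp hl
          subst hrs
          simp [pvRunStep, pvMerge, h1, Ne.symm h1]
        · by_cases hk : k2 = PySem.Chars.isalnum c
          · simp [pvRunStep, pvMerge, hl, hk, h1, Ne.symm h1]
          · simp [pvRunStep, pvMerge, hl, hk, h1, Ne.symm h1]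

theorem pvRuns_eq_pvRunsR (w : List Char) : pvRuns w = pvRunsR w := by
  unfold pvRuns
  rw [pvFoldl_merge, pvMerge_nil_left]

theorem pvAltWord_eq_R (w : List Char) : pvAltWord w = pvAltWordR w := by
  unfold pvAltWord pvAltWordR
  rw [pvRuns_eq_pvRunsR]

theorem pvAWord_eq (w : List Char) : pvAWord w = pvAltWord w := by
  unfold pvAWord
  rw [pvA_fold w [] [], pvAltWord_eq_R]
  simpa using pvH_eq w [] (by simp)

theorem pvFoldl_acc (f : String → String) (ws : List String) : ∀ acc,
    ws.foldl (fun acc w => acc ++ [f w]) acc = acc ++ ws.map f := by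
  induction ws with
  | nil => simp
  | cons w ws ih => intro acc; simp [ih]

-- ===== VERDICT (by name: the statement is the Claim_ definition above) =====
theorem reverse_words_in_text_spec : Claim_equal_reverse_words_in_text := by
  intro s _
  unfold Spec_reverse_words_in_text reverse_words_in_text reverse_words_in_text_alt
  show PySem.Str.join " "
      ((PySem.Str.split₀ s).foldl
        (fun acc word => acc ++ [String.ofList (pvAWord word.toList)]) []) = _
  rw [pvFoldl_acc (fun word => String.ofList (pvAWord word.toList))]
  simp only [List.nil_append]
  congr 1
  exact List.map_congr_left (fun w _ => by rw [pvAWord_eq])
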